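-- pv_equiv track=rewrite | github.com/maximyuss/Yandex | training-5.0/5-4b.py | solve
-- ===== SOURCE A (Python) =====
-- def solve(k):
--     if k < 2: return k
--     tmp = k
--     res = 0
--     k_2 = k // 2 + 1
--     for i in range(1, k_2):
--         res += 2 * i * tmp
--         tmp -= 1
--     if k % 2 == 1:
--         res += (k_2) * (k_2)
--     res += k * (k + 1) // 2
--     return res - 1
-- ===== SOURCE B (Python) =====
-- def solve(k):
--     if k < 2:
--         return k
--     m = k // 2
--     # closed form for sum_{i=1}^{m} 2*i*(k - i + 1)
--     loop_part = (k + 1) * m * (m + 1) - m * (m + 1) * (2 * m + 1) // 3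
--     odd_part = (m + 1) * (m + 1) if k % 2 == 1 else 0
--     return loop_part + odd_part + k * (k + 1) // 2 - 1
-- ===== Notes on version B (the rewrite author's own statement) =====
-- stated objective: faster
-- what changed: Replaced A's linear accumulation loop over half the input with the closed-form polynomial sum formula computed with a constant number of arithmetic operations.
import Mathlib
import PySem

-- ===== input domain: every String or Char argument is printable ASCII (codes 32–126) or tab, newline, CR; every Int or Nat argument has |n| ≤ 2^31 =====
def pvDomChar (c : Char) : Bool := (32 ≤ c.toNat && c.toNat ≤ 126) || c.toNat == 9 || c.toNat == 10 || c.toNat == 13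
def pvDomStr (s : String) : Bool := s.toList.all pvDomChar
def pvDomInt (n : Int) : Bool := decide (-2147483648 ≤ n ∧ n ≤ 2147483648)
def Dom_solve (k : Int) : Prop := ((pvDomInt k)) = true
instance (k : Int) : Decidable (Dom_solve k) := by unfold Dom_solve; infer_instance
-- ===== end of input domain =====

-- ===== PORT A =====
-- B replaces A's O(k) loop by the closed-form polynomial sum (objective: faster, asymptotic).
def solve (k : Int) : Int :=
  if k < 2 then k
  else
    let tmp : Int := k
    let res : Int := 0
    let k2 : Int := PySem.Int.floordiv k 2 + 1
    let st := (PySem.List.pyRange 1 k2 1).foldl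
      (fun (p : Int × Int) i => (p.1 + 2 * i * p.2, p.2 - 1)) (res, tmp)
    let res := st.1
    let res := if PySem.Int.mod k 2 == 1 then res + k2 * k2 else res
    let res := res + PySem.Int.floordiv (k * (k + 1)) 2
    res - 1

-- ===== PORT B =====
def solve_alt (k : Int) : Int :=
  if k < 2 then k
  else
    let m : Int := PySem.Int.floordiv k 2
    let loopPart : Int := (k + 1) * m * (m + 1) - PySem.Int.floordiv (m * (m + 1) * (2 * m + 1)) 3
    let oddPart : Int := if PySem.Int.mod k 2 == 1 then (m + 1) * (m + 1) else 0
    loopPart + oddPart + PySem.Int.floordiv (k * (k + 1)) 2 - 1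

-- ===== PRECONDITION & SPEC =====
def Spec_solve (k : Int) (out : Int) : Prop := out = solve_alt k
instance (k : Int) (out : Int) : Decidable (Spec_solve k out) := by unfold Spec_solve; infer_instance

-- ===== CLAIM (what is proved, stated in full; the proofs are below) =====
def Claim_equal_solve : Prop := ∀ (k : Int), Dom_solve k → Spec_solve k (solve k)

-- ===== LEMMAS AND PROOFS =====

-- f n t = sum_{i=1}^{n} 2*i*(t - i + 1), the value A's loop accumulates
def pvLoopSum : Nat → Int → Int
  | 0, _ => 0
  | n + 1, t => pvLoopSum n t + 2 * ((n : Int) + 1) * (t - n)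

lemma pvLoop_eval (n : Nat) (res tmp : Int) :
    (PySem.List.pyRange 1 ((n : Int) + 1) 1).foldl
      (fun (p : Int × Int) i => (p.1 + 2 * i * p.2, p.2 - 1)) (res, tmp)
    = (res + pvLoopSum n tmp, tmp - n) := by
  induction n generalizing res tmp with
  | zero => simp [PySem.List.pyRange_one_eq_nil, pvLoopSum]
  | succ n ih =>
      have h : (1 : Int) ≤ (n : Int) + 1 := by omega
      rw [show ((n + 1 : Nat) : Int) + 1 = ((n : Int) + 1) + 1 by push_cast; ring,
          PySem.List.pyRange_one_succ_right h, List.foldl_append, ih]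
      simp only [List.foldl_cons, List.foldl_nil, pvLoopSum, Prod.mk.injEq]
      refine ⟨by ring, by push_cast; ring⟩

lemma pvLoopSum_three (n : Nat) (t : Int) :
    3 * pvLoopSum n t = 3 * (t + 1) * n * (n + 1) - n * (n + 1) * (2 * n + 1) := by
  induction n with
  | zero => simp [pvLoopSum]
  | succ n ih =>
      rw [pvLoopSum]
      push_cast
      push_cast at ih
      linear_combination ih

lemma pvLoopSum_closed (n : Nat) (t : Int) :
    pvLoopSum n t = (t + 1) * n * (n + 1) - PySem.Int.floordiv ((n : Int) * (n + 1) * (2 * n + 1)) 3 := by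
  have h3 := pvLoopSum_three n t
  have hd : (n : Int) * (n + 1) * (2 * n + 1) = 3 * ((t + 1) * n * (n + 1) - pvLoopSum n t) := by linear_combination h3
  rw [hd, PySem.Int.floordiv, Int.mul_fdiv_cancel_left _ (by norm_num)]
  ring

-- ===== VERDICT (by name: the statement is the Claim_ definition above) =====
theorem solve_spec : Claim_equal_solve := by
  intro k _
  unfold Spec_solve solve solve_alt
  by_cases hk : k < 2
  · simp [hk]
  · simp only [hk, if_false]
    have hm1 : (1 : Int) ≤ PySem.Int.floordiv k 2 := by
      simp only [PySem.Int.floordiv]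
      rw [Int.fdiv_eq_ediv_of_nonneg _ (by norm_num)]
      omega
    set m : Int := PySem.Int.floordiv k 2 with hm
    have hn : ((m.toNat : Int)) = m := Int.toNat_of_nonneg (by omega)
    have := pvLoop_eval m.toNat 0 k
    rw [hn] at this
    rw [this]
    simp only [zero_add]
    rw [pvLoopSum_closed m.toNat k, hn]
    split_ifs <;> ring
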